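-- pv_equiv track=rewrite | github.com/dimistsaousis/coursera | Algorithms & Data Structures Specialisation/Algorithmic Toolbox/Week2-Warmup/7_fibonacci_partial_sum.py | get_fibonacci_partial_sum_fast
-- ===== SOURCE A (Python) =====
-- def get_fibonacci_sum_naive(n):
--     if n <= 1:
--         return n
--
--     previous = 0
--     current = 1
--     cum_sum = 1
--
--     for _ in range(n - 1):
--         previous, current = current, previous + current
--         cum_sum += current
--
--     return cum_sum % 10
--
-- def get_fibonacci_partial_sum_fast(start, end):
--     cycle = []
--     for i in range(60):
--         cycle.append(get_fibonacci_sum_naive(i))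
--
--     cycle_length = len(cycle)
--
--     my_start = start - (start//cycle_length)*cycle_length
--     my_end = end - (end//cycle_length)*cycle_length
--     return (cycle[my_end] - cycle[my_start-1]) % 10
-- ===== SOURCE B (Python) =====
-- def get_fibonacci_partial_sum_fast(start, end):
--     # Fibonacci mod 10 has Pisano period 60; sum_{i<=n} F(i) = F(n+2) - 1,
--     # so the inclusive partial sum is (F(end+2) - F(start+1)) mod 10.
--     fib = [0, 1]
--     for _ in range(58):
--         fib.append((fib[-1] + fib[-2]) % 10)
--     return (fib[(end + 2) % 60] - fib[(start + 1) % 60]) % 10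
-- ===== Notes on version B (the rewrite author's own statement) =====
-- stated objective: simpler
-- what changed: A builds a 60-entry table of cumulative Fibonacci sums, recomputing each entry with a fresh O(i) Fibonacci loop, then subtracts two table entries; B builds a plain Fibonacci-mod-10 table in one pass and uses the telescoping identity sum_{i<=n} F(i) = F(n+2) - 1, returning (fib[(end+2)%60] - fib[(start+1)%60]) % 10.
import Mathlib
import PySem

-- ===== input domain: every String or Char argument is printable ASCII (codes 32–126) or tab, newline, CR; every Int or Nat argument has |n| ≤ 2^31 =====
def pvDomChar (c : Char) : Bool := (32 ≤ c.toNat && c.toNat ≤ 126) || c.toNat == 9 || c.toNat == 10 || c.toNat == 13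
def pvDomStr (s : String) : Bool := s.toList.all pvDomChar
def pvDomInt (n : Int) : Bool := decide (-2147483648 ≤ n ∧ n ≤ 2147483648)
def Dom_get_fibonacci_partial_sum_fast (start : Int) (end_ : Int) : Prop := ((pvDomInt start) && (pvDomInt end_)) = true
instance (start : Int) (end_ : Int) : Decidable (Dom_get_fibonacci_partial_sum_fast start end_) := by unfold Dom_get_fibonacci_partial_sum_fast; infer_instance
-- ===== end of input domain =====

-- B replaces A's 60-entry cumulative-sum table (each entry recomputed by a fresh Fibonacci
-- loop) with a plain Fibonacci-mod-10 table and the telescoping identity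
-- sum F(i) for i ≤ n = F(n+2) - 1; objective: simpler (constant-factor faster table build).

-- ===== PORT A =====
def pvNaive (n : Int) : Int :=
  if n ≤ 1 then n
  else
    let st := (PySem.List.pyRange 0 (n - 1) 1).foldl
      (fun (s : Int × Int × Int) _ => (s.2.1, s.1 + s.2.1, s.2.2 + (s.1 + s.2.1))) (0, 1, 1)
    PySem.Int.mod st.2.2 10

def get_fibonacci_partial_sum_fast (start : Int) (end_ : Int) : Int :=
  let cycle := (PySem.List.pyRange 0 60 1).foldl (fun acc i => acc ++ [pvNaive i]) ([] : List Int)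
  let cycle_length : Int := cycle.length
  let my_start := start - (PySem.Int.floordiv start cycle_length) * cycle_length
  let my_end := end_ - (PySem.Int.floordiv end_ cycle_length) * cycle_length
  -- cycle[my_end] and cycle[my_start-1]: indices always in range (-1 wraps to the last entry),
  -- so pyGetD's default is never used
  PySem.Int.mod (PySem.List.pyGetD cycle my_end 0 - PySem.List.pyGetD cycle (my_start - 1) 0) 10

-- ===== PORT B =====
def get_fibonacci_partial_sum_fast_alt (start : Int) (end_ : Int) : Int :=
  let fib := (PySem.List.pyRange 0 58 1).foldl
    (fun acc _ => acc ++ [PySem.Int.mod (PySem.List.pyGetD acc (-1) 0 + PySem.List.pyGetD acc (-2) 0) 10])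
    ([0, 1] : List Int)
  PySem.Int.mod
    (PySem.List.pyGetD fib (PySem.Int.mod (end_ + 2) 60) 0 -
     PySem.List.pyGetD fib (PySem.Int.mod (start + 1) 60) 0) 10

-- ===== PRECONDITION & SPEC =====
def Spec_get_fibonacci_partial_sum_fast (start : Int) (end_ : Int) (out : Int) : Prop := out = get_fibonacci_partial_sum_fast_alt start end_
instance (start : Int) (end_ : Int) (out : Int) : Decidable (Spec_get_fibonacci_partial_sum_fast start end_ out) := by unfold Spec_get_fibonacci_partial_sum_fast; infer_instance

-- ===== CLAIM (what is proved, stated in full; the proofs are below) =====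
def Claim_equal_get_fibonacci_partial_sum_fast : Prop := ∀ (start : Int) (end_ : Int), Dom_get_fibonacci_partial_sum_fast start end_ → Spec_get_fibonacci_partial_sum_fast start end_ (get_fibonacci_partial_sum_fast start end_)

-- ===== LEMMAS AND PROOFS =====

-- A's cumulative-sum table, evaluated once
def pvC : List Int := [0, 1, 2, 4, 7, 2, 0, 3, 4, 8, 3, 2, 6, 9, 6, 6, 3, 0, 4, 5, 0, 6, 7, 4, 2, 7, 0, 8, 9, 8, 8, 7, 6, 4, 1, 6, 8, 5, 4, 0, 5, 6, 2, 9, 2, 2, 5, 8, 4, 3, 8, 2, 1, 4, 6, 1, 8, 0, 9, 0]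

-- B's Fibonacci-mod-10 table, evaluated once
def pvF : List Int := [0, 1, 1, 2, 3, 5, 8, 3, 1, 4, 5, 9, 4, 3, 7, 0, 7, 7, 4, 1, 5, 6, 1, 7, 8, 5, 3, 8, 1, 9, 0, 9, 9, 8, 7, 5, 2, 7, 9, 6, 5, 1, 6, 7, 3, 0, 3, 3, 6, 9, 5, 4, 9, 3, 2, 5, 7, 2, 9, 1]

theorem pv_cycle_eq :
    (PySem.List.pyRange 0 60 1).foldl (fun acc i => acc ++ [pvNaive i]) ([] : List Int) = pvC := by
  decide

theorem pv_fib_eq :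
    (PySem.List.pyRange 0 58 1).foldl
      (fun acc _ => acc ++ [PySem.Int.mod (PySem.List.pyGetD acc (-1) 0 + PySem.List.pyGetD acc (-2) 0) 10])
      ([0, 1] : List Int) = pvF := by
  decide

theorem pv_A_eval (s e : Int) :
    get_fibonacci_partial_sum_fast s e =
      (PySem.List.pyGetD pvC (e % 60) 0 - PySem.List.pyGetD pvC (s % 60 - 1) 0) % 10 := by
  show (let cycle := (PySem.List.pyRange 0 60 1).foldl (fun acc i => acc ++ [pvNaive i]) ([] : List Int);
        let cycle_length : Int := cycle.length;
        let my_start := s - (PySem.Int.floordiv s cycle_length) * cycle_length;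
        let my_end := e - (PySem.Int.floordiv e cycle_length) * cycle_length;
        PySem.Int.mod (PySem.List.pyGetD cycle my_end 0 - PySem.List.pyGetD cycle (my_start - 1) 0) 10) = _
  rw [pv_cycle_eq]
  have hlen : ((pvC.length : Int)) = 60 := by decide
  simp only [hlen]
  rw [PySem.Int.floordiv_eq_ediv_of_pos (by norm_num : (0:Int) < 60),
      PySem.Int.floordiv_eq_ediv_of_pos (by norm_num : (0:Int) < 60),
      PySem.Int.mod_eq_emod_of_pos (by norm_num : (0:Int) < 10)]
  have hs : s - s / 60 * 60 = s % 60 := by omega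
  have he : e - e / 60 * 60 = e % 60 := by omega
  rw [hs, he]

theorem pv_B_eval (s e : Int) :
    get_fibonacci_partial_sum_fast_alt s e =
      (PySem.List.pyGetD pvF ((e + 2) % 60) 0 - PySem.List.pyGetD pvF ((s + 1) % 60) 0) % 10 := by
  show (let fib := (PySem.List.pyRange 0 58 1).foldl
          (fun acc _ => acc ++ [PySem.Int.mod (PySem.List.pyGetD acc (-1) 0 + PySem.List.pyGetD acc (-2) 0) 10])
          ([0, 1] : List Int);
        PySem.Int.mod
          (PySem.List.pyGetD fib (PySem.Int.mod (e + 2) 60) 0 -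
           PySem.List.pyGetD fib (PySem.Int.mod (s + 1) 60) 0) 10) = _
  rw [pv_fib_eq]
  rw [PySem.Int.mod_eq_emod_of_pos (by norm_num : (0:Int) < 60),
      PySem.Int.mod_eq_emod_of_pos (by norm_num : (0:Int) < 60),
      PySem.Int.mod_eq_emod_of_pos (by norm_num : (0:Int) < 10)]

set_option maxRecDepth 100000 in
theorem pv_key : ∀ (a b : Fin 60),
    (PySem.List.pyGetD pvC ((b : Int)) 0 - PySem.List.pyGetD pvC ((a : Int) - 1) 0) % 10 =
      (PySem.List.pyGetD pvF (((b : Int) + 2) % 60) 0 - PySem.List.pyGetD pvF (((a : Int) + 1) % 60) 0) % 10 := by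
  decide

-- ===== VERDICT (by name: the statement is the Claim_ definition above) =====
theorem get_fibonacci_partial_sum_fast_spec : Claim_equal_get_fibonacci_partial_sum_fast := by
  intro s e _
  unfold Spec_get_fibonacci_partial_sum_fast
  rw [pv_A_eval, pv_B_eval]
  have ha0 : 0 ≤ s % 60 := by omega
  have ha1 : s % 60 < 60 := by omega
  have hb0 : 0 ≤ e % 60 := by omega
  have hb1 : e % 60 < 60 := by omega
  have := pv_key ⟨(s % 60).toNat, by omega⟩ ⟨(e % 60).toNat, by omega⟩
  rw [Int.toNat_of_nonneg ha0, Int.toNat_of_nonneg hb0] at this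
  have hes : (e + 2) % 60 = (e % 60 + 2) % 60 := by omega
  have hss : (s + 1) % 60 = (s % 60 + 1) % 60 := by omega
  rw [hes, hss, this]
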